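-- pv_equiv track=rewrite | github.com/mquigley/ghidra | Ghidra/Processors/sla_dump.py | _decode_context_constraints
-- ===== SOURCE A (Python) =====
-- def _decode_context_constraints(ctx_bytes, context_fields):
--     """
--     Decode context byte constraints to field=value pairs.
--     Returns dict: field_name -> value (int), only for fully-constrained fields.
--     """
--     # Build a map: context_bit_num -> constrained_value (0 or 1)
--     constrained_bits = {}
--     for byte_off, m, v in ctx_bytes:
--         for bit_in_byte in range(8):
--             if (m >> bit_in_byte) & 1:
--                 # bit_in_byte 7 = MSB of byte = context bit byte_off*8 + 0
--                 ctx_bit = byte_off * 8 + (7 - bit_in_byte)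
--                 constrained_bits[ctx_bit] = (v >> bit_in_byte) & 1
--
--     # Map constrained bits back to fields
--     field_vals = {}
--     for name, (low, high) in context_fields.items():
--         field_val = 0
--         all_present = True
--         for b in range(low, high + 1):
--             if b not in constrained_bits:
--                 all_present = False
--                 break
--             field_val |= constrained_bits[b] << (b - low)
--         if all_present:
--             field_vals[name] = field_val
--
--     return field_vals
-- ===== SOURCE B (Python) =====
-- def _rev8(b):
--     # reverse the 8 bits of a byte by masked swaps
--     b = ((b & 0xF0) >> 4) | ((b & 0x0F) << 4)
--     b = ((b & 0xCC) >> 2) | ((b & 0x33) << 2)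
--     b = ((b & 0xAA) >> 1) | ((b & 0x55) << 1)
--     return b
--
--
-- def _decode_context_constraints(ctx_bytes, context_fields):
--     """
--     Decode context byte constraints to field=value pairs.
--     Returns dict: field_name -> value (int), only for fully-constrained fields.
--     """
--     # Merge constraints per byte offset, storing each byte bit-reversed so that
--     # bit k of the stored byte is context bit byte_off*8 + k (last write wins).
--     per_byte = {}
--     for byte_off, m, v in ctx_bytes:
--         rm = _rev8(m & 0xFF)
--         rv = _rev8(v & m & 0xFF)
--         om, ov = per_byte.get(byte_off, (0, 0))
--         per_byte[byte_off] = (om | rm, (ov & ~rm) | rv)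
--
--     # Extract each field with byte-granular arithmetic: concatenate the touched
--     # bytes into (mask, value) integers, then compare the field's slice of the
--     # mask against a full mask -- no per-bit scan.
--     out = {}
--     for name, (low, high) in context_fields.items():
--         width = max(0, high - low + 1)
--         full = (1 << width) - 1
--         b0 = low // 8
--         M = V = 0
--         for bo in range(b0, high // 8 + 1):
--             em, ev = per_byte.get(bo, (0, 0))
--             sh = 8 * (bo - b0)
--             M |= em << sh
--             V |= ev << sh
--         shift = low % 8
--         if (M >> shift) & full == full:
--             out[name] = (V >> shift) & full
--     return out
-- ===== Notes on version B (the rewrite author's own statement) =====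
-- stated objective: alternative
-- what changed: B replaces A's per-bit dict and per-field per-bit early-exit scan by a per-byte dict of bit-reversed merged (mask,value) bytes built with masked-swap byte reversal, and decodes each field without any per-bit loop: it concatenates only the touched bytes into two integers and tests/extracts the field with shift-and-mask arithmetic ((mask>>shift)&full==full).
import Mathlib
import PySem

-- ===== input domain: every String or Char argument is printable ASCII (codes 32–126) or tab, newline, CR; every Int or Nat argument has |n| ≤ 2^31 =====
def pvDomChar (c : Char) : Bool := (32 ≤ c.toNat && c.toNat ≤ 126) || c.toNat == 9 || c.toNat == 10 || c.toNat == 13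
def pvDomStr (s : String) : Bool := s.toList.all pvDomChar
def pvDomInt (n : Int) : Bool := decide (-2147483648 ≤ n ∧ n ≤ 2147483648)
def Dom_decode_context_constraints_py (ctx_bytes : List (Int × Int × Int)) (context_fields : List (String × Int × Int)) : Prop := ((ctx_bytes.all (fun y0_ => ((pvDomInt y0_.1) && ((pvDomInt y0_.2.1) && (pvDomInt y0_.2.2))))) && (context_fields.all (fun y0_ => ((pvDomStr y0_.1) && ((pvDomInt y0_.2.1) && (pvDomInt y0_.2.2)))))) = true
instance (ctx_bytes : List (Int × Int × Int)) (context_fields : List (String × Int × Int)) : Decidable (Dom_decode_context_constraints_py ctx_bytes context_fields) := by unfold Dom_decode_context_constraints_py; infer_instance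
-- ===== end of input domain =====

-- B replaces A's per-bit dict and per-field per-bit scan by a per-byte dict of
-- bit-reversed merged (mask, value) bytes and decodes each field by concatenating
-- the touched bytes and one shift-and-mask comparison (objective: alternative;
-- return-value equivalence only — neither implementation mutates its arguments).

-- ===== PORT A =====
-- constrained_bits = {}; for byte_off, m, v in ctx_bytes: for bit_in_byte in range(8): ...
def pvA_bits (ctx_bytes : List (Int × Int × Int)) : PySem.Dict Int Int :=
  ctx_bytes.foldl (fun (d : PySem.Dict Int Int) (t : Int × Int × Int) =>
    (PySem.List.pyRange 0 8 1).foldl (fun (d : PySem.Dict Int Int) bit =>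
      if PySem.Int.band (t.2.1 >>> bit.toNat) 1 = 1 then
        d.insert (t.1 * 8 + (7 - bit)) (PySem.Int.band (t.2.2 >>> bit.toNat) 1)
      else d) d) PySem.Dict.empty

-- the inner loop over range(low, high+1) with its early 'break' on a missing bit
def pvA_field (bits : PySem.Dict Int Int) (low : Int) : List Int → Int → Option Int
  | [], acc => some acc
  | b :: rest, acc =>
    match bits.get? b with
    | none => none
    | some bv => pvA_field bits low rest (PySem.Int.bor acc (bv <<< (b - low).toNat))

def decode_context_constraints_py (ctx_bytes : List (Int × Int × Int)) (context_fields : List (String × Int × Int)) : List (String × Int) :=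
  let bits := pvA_bits ctx_bytes
  (context_fields.foldl (fun d f =>
      match pvA_field bits f.2.1 (PySem.List.pyRange f.2.1 (f.2.2 + 1) 1) 0 with
      | some fv => d.insert f.1 fv
      | none => d) PySem.Dict.empty).items

-- ===== PORT B =====
-- _rev8: reverse the 8 bits of a byte by masked swaps (all operands stay ≥ 0)
def pvRev8 (b : Int) : Int :=
  let b1 := PySem.Int.bor ((PySem.Int.band b 240) >>> (4:Nat)) ((PySem.Int.band b 15) <<< (4:Nat))
  let b2 := PySem.Int.bor ((PySem.Int.band b1 204) >>> (2:Nat)) ((PySem.Int.band b1 51) <<< (2:Nat))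
  PySem.Int.bor ((PySem.Int.band b2 170) >>> (1:Nat)) ((PySem.Int.band b2 85) <<< (1:Nat))

-- per_byte = {}; for byte_off, m, v: rm = _rev8(m & 0xFF); rv = _rev8(v & m & 0xFF); ...
def pvB_merged (ctx_bytes : List (Int × Int × Int)) : PySem.Dict Int (Int × Int) :=
  ctx_bytes.foldl (fun (d : PySem.Dict Int (Int × Int)) (t : Int × Int × Int) =>
    let rm := pvRev8 (PySem.Int.band t.2.1 255)
    let rv := pvRev8 (PySem.Int.band (PySem.Int.band t.2.2 t.2.1) 255)
    let p := d.getD t.1 (0, 0)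
    d.insert t.1 (PySem.Int.bor p.1 rm,
                  PySem.Int.bor (PySem.Int.band p.2 (Int.not rm)) rv))
    PySem.Dict.empty

-- the byte-concatenation loop: for bo in range(b0, high//8 + 1): M |= em << sh; ...
-- (sh = 8*(bo-b0) is ≥ 0 throughout the range, so .toNat is exact)
def pvB_concat (per : PySem.Dict Int (Int × Int)) (b0 hi : Int) : Int × Int :=
  (PySem.List.pyRange b0 hi 1).foldl
    (fun (mv : Int × Int) bo =>
      let p := per.getD bo (0, 0)
      let sh := (8 * (bo - b0)).toNat
      (PySem.Int.bor mv.1 (p.1 <<< sh), PySem.Int.bor mv.2 (p.2 <<< sh))) (0, 0)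

-- the field loop with shift-and-mask extraction; a dict built then .items
def decode_context_constraints_py_alt (ctx_bytes : List (Int × Int × Int)) (context_fields : List (String × Int × Int)) : List (String × Int) :=
  let per := pvB_merged ctx_bytes
  (context_fields.foldl (fun (d : PySem.Dict String Int) f =>
      let low := f.2.1
      let high := f.2.2
      let width : Int := max 0 (high - low + 1)
      let full : Int := (1 <<< width.toNat) - 1
      let mv := pvB_concat per (PySem.Int.floordiv low 8) (PySem.Int.floordiv high 8 + 1)
      let shift := (PySem.Int.mod low 8).toNat
      if PySem.Int.band (mv.1 >>> shift) full = full then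
        d.insert f.1 (PySem.Int.band (mv.2 >>> shift) full)
      else d) PySem.Dict.empty).items

-- ===== PRECONDITION & SPEC =====
-- (A is total: no Pre_)
def Spec_decode_context_constraints_py (ctx_bytes : List (Int × Int × Int)) (context_fields : List (String × Int × Int)) (out : List (String × Int)) : Prop := out = decode_context_constraints_py_alt ctx_bytes context_fields
instance (ctx_bytes : List (Int × Int × Int)) (context_fields : List (String × Int × Int)) (out : List (String × Int)) : Decidable (Spec_decode_context_constraints_py ctx_bytes context_fields out) := by unfold Spec_decode_context_constraints_py; infer_instance

-- ===== CLAIM (what is proved, stated in full; the proofs are below) =====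
def Claim_equal_decode_context_constraints_py : Prop := ∀ (ctx_bytes : List (Int × Int × Int)) (context_fields : List (String × Int × Int)), Dom_decode_context_constraints_py ctx_bytes context_fields → Spec_decode_context_constraints_py ctx_bytes context_fields (decode_context_constraints_py ctx_bytes context_fields)

-- ===== LEMMAS AND PROOFS =====

-- ---- generic Int bit lemmas (Python semantics of &, |, ~, >>) ----

theorem pv_sub_and_eq_ldiff (n m : Nat) : n - (n &&& m) = n.ldiff m := by
  induction n using Nat.strong_induction_on generalizing m with
  | _ n IH =>
    rcases Nat.eq_zero_or_pos n with h0 | h0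
    · subst h0
      have : Nat.ldiff 0 m = 0 := by
        apply Nat.eq_of_testBit_eq; simp [Nat.testBit_ldiff]
      simp [this]
    · have hdivand : (n &&& m) / 2 = (n / 2) &&& (m / 2) := by
        have := Nat.eq_of_testBit_eq (x := (n &&& m) >>> 1) (y := (n >>> 1) &&& (m >>> 1))
          (by intro i; simp [Nat.testBit_shiftRight, Nat.testBit_and])
        simpa [Nat.shiftRight_succ, Nat.shiftRight_eq_div_pow] using this
      have hdivld : (Nat.ldiff n m) / 2 = Nat.ldiff (n / 2) (m / 2) := by
        have := Nat.eq_of_testBit_eq (x := (Nat.ldiff n m) >>> 1) (y := Nat.ldiff (n >>> 1) (m >>> 1))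
          (by intro i; simp [Nat.testBit_shiftRight, Nat.testBit_ldiff])
        simpa [Nat.shiftRight_succ, Nat.shiftRight_eq_div_pow] using this
      have hand2 : ((n &&& m) % 2 = 1) ↔ (n % 2 = 1 ∧ m % 2 = 1) := by
        have h := Nat.testBit_and n m 0
        simp only [Nat.testBit_zero, ← Bool.decide_and] at h
        exact decide_eq_decide.mp h
      have hld2 : ((Nat.ldiff n m) % 2 = 1) ↔ (n % 2 = 1 ∧ ¬ m % 2 = 1) := by
        have h := Nat.testBit_ldiff n m 0
        simp only [Nat.testBit_zero, ← decide_not, ← Bool.decide_and] at h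
        exact decide_eq_decide.mp h
      have IH2 := IH (n / 2) (by omega) (m / 2)
      have hle : (n/2) &&& (m/2) ≤ n/2 := Nat.and_le_left
      have hb1 : (n &&& m) % 2 < 2 := Nat.mod_lt _ (by omega)
      have hb2 : (Nat.ldiff n m) % 2 < 2 := Nat.mod_lt _ (by omega)
      omega

theorem pv_band_eq_land (a b : Int) : PySem.Int.band a b = Int.land a b := by
  cases a with
  | ofNat m =>
    cases b with
    | ofNat n => simp [PySem.Int.band, Int.land]
    | negSucc n =>
      have h1 : ¬ (0 : Int) ≤ Int.negSucc n := by omega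
      have h2 : ((-(Int.negSucc n) - 1)).toNat = n := by simp [Int.negSucc_eq]
      simp [PySem.Int.band, Int.land, h1, pv_sub_and_eq_ldiff]
  | negSucc m =>
    have h1 : ¬ (0 : Int) ≤ Int.negSucc m := by omega
    have h2 : ((-(Int.negSucc m) - 1)).toNat = m := by simp [Int.negSucc_eq]
    cases b with
    | ofNat n => simp [PySem.Int.band, Int.land, h1, pv_sub_and_eq_ldiff]
    | negSucc n =>
      have h3 : ¬ (0 : Int) ≤ Int.negSucc n := by omega
      have h4 : ((-(Int.negSucc n) - 1)).toNat = n := by simp [Int.negSucc_eq]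
      simp [PySem.Int.band, Int.land, Int.negSucc_eq]
      omega

theorem pv_bor_eq_lor (a b : Int) : PySem.Int.bor a b = Int.lor a b := by
  cases a with
  | ofNat m =>
    cases b with
    | ofNat n => simp [PySem.Int.bor, Int.lor]
    | negSucc n =>
      have h1 : ¬ (0 : Int) ≤ Int.negSucc n := by omega
      have h2 : ((-(Int.negSucc n) - 1)).toNat = n := by simp [Int.negSucc_eq]
      simp [PySem.Int.bor, Int.lor, h1, pv_sub_and_eq_ldiff]
      omega
  | negSucc m =>
    have h1 : ¬ (0 : Int) ≤ Int.negSucc m := by omega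
    have h2 : ((-(Int.negSucc m) - 1)).toNat = m := by simp [Int.negSucc_eq]
    cases b with
    | ofNat n =>
      simp [PySem.Int.bor, Int.lor, h1, pv_sub_and_eq_ldiff]
      omega
    | negSucc n =>
      have h3 : ¬ (0 : Int) ≤ Int.negSucc n := by omega
      have h4 : ((-(Int.negSucc n) - 1)).toNat = n := by simp [Int.negSucc_eq]
      simp [PySem.Int.bor, Int.lor, h1, h3]
      omega

theorem pv_testBit_band (x y : Int) (k : Nat) :
    (PySem.Int.band x y).testBit k = (x.testBit k && y.testBit k) := by
  rw [pv_band_eq_land]; exact Int.testBit_land ..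

theorem pv_testBit_bor (x y : Int) (k : Nat) :
    (PySem.Int.bor x y).testBit k = (x.testBit k || y.testBit k) := by
  rw [pv_bor_eq_lor]; exact Int.testBit_lor ..

theorem pv_testBit_shiftRight (x : Int) (k j : Nat) : (x >>> k).testBit j = x.testBit (k + j) := by
  cases x with
  | ofNat n =>
    show (Int.ofNat (n >>> k)).testBit j = _
    simp [Int.testBit, Nat.testBit_shiftRight]
  | negSucc n =>
    show (Int.negSucc (n >>> k)).testBit j = _
    simp [Int.testBit, Nat.testBit_shiftRight]

theorem pv_testBit_not (x : Int) (k : Nat) : (Int.not x).testBit k = !x.testBit k := by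
  cases x <;> simp [Int.not, Int.testBit]

theorem pv_pybit (x : Int) (k : Nat) :
    PySem.Int.band (x >>> k) 1 = if x.testBit k then 1 else 0 := by
  have hx : x.testBit k = (x >>> k).testBit 0 := by
    rw [pv_testBit_shiftRight]; simp
  rw [hx]
  generalize (x >>> k) = y
  cases y with
  | ofNat n =>
    have : PySem.Int.band (Int.ofNat n) 1 = ((n &&& 1 : Nat) : Int) := by
      simp [PySem.Int.band]
    rw [this]
    simp [Int.testBit, Nat.and_one_is_mod, Nat.testBit_zero]
    omega
  | negSucc n =>
    have h1 : ¬ (0 : Int) ≤ Int.negSucc n := by omega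
    have h2 : ((-(Int.negSucc n) - 1)).toNat = n := by simp [Int.negSucc_eq]
    have : PySem.Int.band (Int.negSucc n) 1 = ((1 - (1 &&& n) : Nat) : Int) := by
      simp [PySem.Int.band, h1]
    rw [this]
    have h3 : (1 &&& n) = n % 2 := by rw [Nat.and_comm]; exact Nat.and_one_is_mod n
    simp [Int.testBit, Nat.testBit_zero, h3]
    omega

theorem pv_shift_cast (x : Int) (k : Nat) : x >>> ((k : Int)) = x >>> k := by
  cases x <;> cases k <;> rfl

theorem pv_range8 : PySem.List.pyRange 0 8 1 = [0,1,2,3,4,5,6,7] := by decide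

theorem pv_cond (x : Int) (k : Nat) : (PySem.Int.band (x >>> k) 1 = 1) ↔ (x.testBit k = true) := by
  rw [pv_pybit]; by_cases h : x.testBit k <;> simp [h]

-- ---- casts between the Int-level operations of the ports and Nat bit arithmetic ----

theorem pv_band_nn (a b : Nat) : PySem.Int.band (a : Int) (b : Int) = ((a &&& b : Nat) : Int) := by
  simp [PySem.Int.band]

theorem pv_bor_nn (a b : Nat) : PySem.Int.bor (a : Int) (b : Int) = ((a ||| b : Nat) : Int) := by
  simp [PySem.Int.bor]

theorem pv_shr_nn (a k : Nat) : ((a : Int) >>> k) = ((a >>> k : Nat) : Int) := rfl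

theorem pv_shl_nn (a k : Nat) : ((a : Int) <<< k) = ((a <<< k : Nat) : Int) := rfl

theorem pv_band_not_nn (b r : Nat) :
    PySem.Int.band (b : Int) (Int.not (r : Int)) = ((b.ldiff r : Nat) : Int) := by
  have h1 : Int.not (r : Int) = Int.negSucc r := rfl
  have h2 : ¬ (0 : Int) ≤ Int.negSucc r := by omega
  have h3 : ((-(Int.negSucc r) - 1)).toNat = r := by simp [Int.negSucc_eq]
  rw [h1]
  simp [PySem.Int.band, h2, pv_sub_and_eq_ldiff]

theorem pv_testBit_nn (a : Nat) (k : Nat) : ((a : Int)).testBit k = a.testBit k := rfl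

theorem pv_testBit_ge (a k : Nat) (ha : a < 256) (hk : 8 ≤ k) : a.testBit k = false :=
  Nat.testBit_lt_two_pow (lt_of_lt_of_le ha
    (show (2:Nat) ^ 8 ≤ 2 ^ k from Nat.pow_le_pow_right (by norm_num) hk))

-- ---- the byte reversal: Int level reduced to Nat level, then decided ----

def pvRev8N (n : Nat) : Nat := (pvRev8 (n : Int)).toNat

set_option maxRecDepth 40000 in
theorem pv_rev8_cast : ∀ n < 256, pvRev8 ((n : Nat) : Int) = ((pvRev8N n : Nat) : Int) := by decide

set_option maxRecDepth 40000 in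
theorem pv_rev8N_lt : ∀ n < 256, pvRev8N n < 256 := by decide

set_option maxRecDepth 40000 in
theorem pv_rev8N_testBit_dec : ∀ n < 256, ∀ k < 8, (pvRev8N n).testBit k = n.testBit (7 - k) := by decide

-- x & 0xFF as a Nat below 256 keeping the low 8 bits of x
theorem pv_band255 (x : Int) :
    ∃ a : Nat, PySem.Int.band x 255 = (a : Int) ∧ a < 256 ∧
      ∀ k : Nat, a.testBit k = (x.testBit k && decide (k < 8)) := by
  have h255 : ∀ k : Nat, (255 : Nat).testBit k = decide (k < 8) := by
    intro k
    have : (255 : Nat) = 2 ^ 8 - 1 := by norm_num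
    rw [this, Nat.testBit_two_pow_sub_one]
  cases x with
  | ofNat n =>
    refine ⟨n &&& 255, ?_, lt_of_le_of_lt Nat.and_le_right (by norm_num), fun k => ?_⟩
    · show PySem.Int.band (Int.ofNat n) (Int.ofNat 255) = Int.ofNat (n &&& 255)
      simp [PySem.Int.band]
    · rw [Nat.testBit_and, h255]
      rfl
  | negSucc n =>
    have h1 : ¬ (0 : Int) ≤ Int.negSucc n := by omega
    have h2 : ((-(Int.negSucc n) - 1)).toNat = n := by simp [Int.negSucc_eq]
    refine ⟨Nat.ldiff 255 n, ?_, (by have := pv_sub_and_eq_ldiff 255 n; omega), fun k => ?_⟩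
    · show PySem.Int.band _ (Int.ofNat 255) = _
      simp [PySem.Int.band, h1, pv_sub_and_eq_ldiff]
    · rw [Nat.testBit_ldiff, h255]
      simp only [Int.testBit]
      cases n.testBit k <;> cases decide (k < 8) <;> rfl

-- ---- phase 1: A's per-bit dict agrees with a per-bit read of B's per-byte dict ----

-- invariant: every (mask, value) entry of B's merged dict is a pair of bytes
def pvInv (P : PySem.Dict Int (Int × Int)) : Prop :=
  ∀ key : Int, ∃ a b : Nat, P.getD key (0, 0) = ((a : Int), (b : Int)) ∧ a < 256 ∧ b < 256

-- reading context bit b out of the per-byte dict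
def pvLook (P : PySem.Dict Int (Int × Int)) (b : Int) : Option Int :=
  let p := P.getD (b / 8) (0, 0)
  if p.1.testBit (b % 8).toNat then some (if p.2.testBit (b % 8).toNat then 1 else 0) else none

theorem pv_peel_ne (d : PySem.Dict Int Int) (c : Prop) [Decidable c] (key val b : Int)
    (h : b ≠ key) : (if c then d.insert key val else d).get? b = d.get? b := by
  split_ifs with hc
  · exact PySem.Dict.get?_insert_of_ne d val h
  · rfl

theorem pv_peel_eq (d : PySem.Dict Int Int) (c : Prop) [Decidable c] (val b : Int) :
    (if c then d.insert b val else d).get? b = if c then some val else d.get? b := by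
  split_ifs with hc
  · exact PySem.Dict.get?_insert_self d b val
  · rfl

theorem pv_chain (bo m v : Int) (l : List Int) (d : PySem.Dict Int Int) (b : Int) :
    (l.foldl (fun (d : PySem.Dict Int Int) (bit : Int) =>
        if PySem.Int.band (m >>> bit.toNat) 1 = 1 then
          d.insert (bo * 8 + (7 - bit)) (PySem.Int.band (v >>> bit.toNat) 1)
        else d) d).get? b
    = if (7 - (b - bo * 8)) ∈ l ∧ m.testBit (7 - (b - bo * 8)).toNat
      then some (if v.testBit (7 - (b - bo * 8)).toNat then 1 else 0)
      else d.get? b := by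
  induction l using List.reverseRecOn generalizing d with
  | nil => simp
  | append_singleton l' t IH =>
    rw [List.foldl_append, List.foldl_cons, List.foldl_nil]
    by_cases hbt : b = bo * 8 + (7 - t)
    · have ht : t = 7 - (b - bo * 8) := by omega
      subst hbt
      rw [pv_peel_eq _ _ _ _]
      rw [show (7 - (bo * 8 + (7 - t) - bo * 8)) = t from by omega]
      simp only [pv_cond m t.toNat, pv_pybit v t.toNat]
      by_cases hm : m.testBit t.toNat
      · simp [hm]
      · rw [if_neg (by simp [hm]), if_neg (by simp [hm]), IH]
        rw [show (7 - (bo * 8 + (7 - t) - bo * 8)) = t from by omega]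
        simp [hm]
    · rw [pv_peel_ne _ _ _ _ _ hbt, IH]
      have hne : (7 - (b - bo * 8)) ≠ t := by omega
      simp [List.mem_append, hne]

theorem pv_inv_step (dB : PySem.Dict Int (Int × Int)) (hI : pvInv dB) (t : Int × Int × Int) :
    pvInv (dB.insert t.1
        (PySem.Int.bor (dB.getD t.1 (0, 0)).1 (pvRev8 (PySem.Int.band t.2.1 255)),
         PySem.Int.bor (PySem.Int.band (dB.getD t.1 (0, 0)).2 (Int.not (pvRev8 (PySem.Int.band t.2.1 255))))
           (pvRev8 (PySem.Int.band (PySem.Int.band t.2.2 t.2.1) 255)))) := by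
  intro key
  by_cases hk : key = t.1
  · rw [hk, PySem.Dict.getD_insert_self]
    obtain ⟨a, c, hp, ha, hc⟩ := hI t.1
    obtain ⟨mN, hmEq, hmLt, _⟩ := pv_band255 t.2.1
    obtain ⟨vN, hvEq, hvLt, _⟩ := pv_band255 (PySem.Int.band t.2.2 t.2.1)
    rw [hp, hmEq, hvEq, pv_rev8_cast mN hmLt, pv_rev8_cast vN hvLt]
    dsimp only
    rw [pv_bor_nn, pv_band_not_nn, pv_bor_nn]
    have h256 : (256 : Nat) = 2 ^ 8 := by norm_num
    refine ⟨a ||| pvRev8N mN, c.ldiff (pvRev8N mN) ||| pvRev8N vN, rfl, ?_, ?_⟩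
    · rw [h256]; exact Nat.or_lt_two_pow (h256 ▸ ha) (h256 ▸ pv_rev8N_lt mN hmLt)
    · rw [h256]
      refine Nat.or_lt_two_pow ?_ (h256 ▸ pv_rev8N_lt vN hvLt)
      have := pv_sub_and_eq_ldiff c (pvRev8N mN)
      omega
  · rw [PySem.Dict.getD_insert_of_ne _ _ _ hk]
    exact hI key

theorem pv_step (dA : PySem.Dict Int Int) (dB : PySem.Dict Int (Int × Int))
    (hI : pvInv dB) (h : ∀ b, dA.get? b = pvLook dB b) (t : Int × Int × Int) (b : Int) :
    ((PySem.List.pyRange 0 8 1).foldl (fun (d : PySem.Dict Int Int) (bit : Int) =>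
        if PySem.Int.band (t.2.1 >>> bit.toNat) 1 = 1 then
          d.insert (t.1 * 8 + (7 - bit)) (PySem.Int.band (t.2.2 >>> bit.toNat) 1)
        else d) dA).get? b
    = pvLook (dB.insert t.1
        (PySem.Int.bor (dB.getD t.1 (0, 0)).1 (pvRev8 (PySem.Int.band t.2.1 255)),
         PySem.Int.bor (PySem.Int.band (dB.getD t.1 (0, 0)).2 (Int.not (pvRev8 (PySem.Int.band t.2.1 255))))
           (pvRev8 (PySem.Int.band (PySem.Int.band t.2.2 t.2.1) 255)))) b := by
  obtain ⟨mN, hmEq, hmLt, hmBits⟩ := pv_band255 t.2.1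
  obtain ⟨vN, hvEq, hvLt, hvBits⟩ := pv_band255 (PySem.Int.band t.2.2 t.2.1)
  rw [pv_chain]
  by_cases hq : b / 8 = t.1
  · have hr0 : 0 ≤ b % 8 := Int.emod_nonneg b (by norm_num)
    have hr8 : b % 8 < 8 := Int.emod_lt_of_pos b (by norm_num)
    set k : Nat := (b % 8).toNat with hkdef
    have hk8 : k < 8 := by omega
    have hmem : (7 - (b - t.1 * 8)) ∈ PySem.List.pyRange 0 8 1 := by
      rw [pv_range8]; simp; omega
    have h7 : (7 - (b - t.1 * 8)).toNat = 7 - k := by omega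
    rw [if_congr (and_iff_right hmem) rfl rfl, h7]
    unfold pvLook
    rw [hq, PySem.Dict.getD_insert_self]
    dsimp only
    rw [hmEq, hvEq, pv_rev8_cast mN hmLt, pv_rev8_cast vN hvLt]
    have hrmBit : ((pvRev8N mN : Nat) : Int).testBit k = t.2.1.testBit (7 - k) := by
      rw [pv_testBit_nn, pv_rev8N_testBit_dec mN hmLt k hk8, hmBits]
      simp [(by omega : 7 - k < 8)]
    have hrvBit : ((pvRev8N vN : Nat) : Int).testBit k
        = (t.2.2.testBit (7 - k) && t.2.1.testBit (7 - k)) := by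
      rw [pv_testBit_nn, pv_rev8N_testBit_dec vN hvLt k hk8, hvBits, pv_testBit_band]
      simp [(by omega : 7 - k < 8)]
    by_cases hmbit : t.2.1.testBit (7 - k)
    · rw [if_pos hmbit]
      have hmaskT : (PySem.Int.bor (dB.getD t.1 (0, 0)).1 ((pvRev8N mN : Nat) : Int)).testBit k = true := by
        rw [pv_testBit_bor, hrmBit, hmbit]; simp
      rw [if_pos hmaskT]
      have : (PySem.Int.bor (PySem.Int.band (dB.getD t.1 (0, 0)).2
          (Int.not ((pvRev8N mN : Nat) : Int))) ((pvRev8N vN : Nat) : Int)).testBit k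
          = t.2.2.testBit (7 - k) := by
        rw [pv_testBit_bor, pv_testBit_band, pv_testBit_not, hrmBit, hrvBit, hmbit]
        simp
      rw [this]
    · have hmb' : t.2.1.testBit (7 - k) = false := by simpa using hmbit
      rw [if_neg hmbit, h b]
      unfold pvLook
      rw [hq]
      dsimp only
      have hmask : (PySem.Int.bor (dB.getD t.1 (0, 0)).1 ((pvRev8N mN : Nat) : Int)).testBit k
          = (dB.getD t.1 (0, 0)).1.testBit k := by
        rw [pv_testBit_bor, hrmBit, hmb']
        simp
      have hval : (PySem.Int.bor (PySem.Int.band (dB.getD t.1 (0, 0)).2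
          (Int.not ((pvRev8N mN : Nat) : Int))) ((pvRev8N vN : Nat) : Int)).testBit k
          = (dB.getD t.1 (0, 0)).2.testBit k := by
        rw [pv_testBit_bor, pv_testBit_band, pv_testBit_not, hrmBit, hrvBit, hmb']
        simp
      rw [hmask, hval]
  · have hnm : (7 - (b - t.1 * 8)) ∉ PySem.List.pyRange 0 8 1 := by
      rw [pv_range8]
      simp only [List.mem_cons, List.not_mem_nil, or_false]
      omega
    rw [if_neg (fun hc => hnm hc.1), h b]
    unfold pvLook
    rw [PySem.Dict.getD_insert_of_ne _ _ _ hq]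

theorem pv_loop (cb : List (Int × Int × Int)) :
    ∀ (dA : PySem.Dict Int Int) (dB : PySem.Dict Int (Int × Int)),
      pvInv dB → (∀ b, dA.get? b = pvLook dB b) →
      pvInv (cb.foldl (fun (d : PySem.Dict Int (Int × Int)) (t : Int × Int × Int) =>
          d.insert t.1 (PySem.Int.bor (d.getD t.1 (0, 0)).1 (pvRev8 (PySem.Int.band t.2.1 255)),
            PySem.Int.bor (PySem.Int.band (d.getD t.1 (0, 0)).2 (Int.not (pvRev8 (PySem.Int.band t.2.1 255))))
              (pvRev8 (PySem.Int.band (PySem.Int.band t.2.2 t.2.1) 255)))) dB) ∧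
      ∀ b, (cb.foldl (fun (d : PySem.Dict Int Int) (t : Int × Int × Int) =>
              (PySem.List.pyRange 0 8 1).foldl (fun (d : PySem.Dict Int Int) (bit : Int) =>
                if PySem.Int.band (t.2.1 >>> bit.toNat) 1 = 1 then
                  d.insert (t.1 * 8 + (7 - bit)) (PySem.Int.band (t.2.2 >>> bit.toNat) 1)
                else d) d) dA).get? b
        = pvLook (cb.foldl (fun (d : PySem.Dict Int (Int × Int)) (t : Int × Int × Int) =>
            d.insert t.1 (PySem.Int.bor (d.getD t.1 (0, 0)).1 (pvRev8 (PySem.Int.band t.2.1 255)),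
              PySem.Int.bor (PySem.Int.band (d.getD t.1 (0, 0)).2 (Int.not (pvRev8 (PySem.Int.band t.2.1 255))))
                (pvRev8 (PySem.Int.band (PySem.Int.band t.2.2 t.2.1) 255)))) dB) b := by
  induction cb with
  | nil => intro dA dB hI h; exact ⟨hI, h⟩
  | cons t rest IH =>
    intro dA dB hI h
    rw [List.foldl_cons, List.foldl_cons]
    exact IH _ _ (pv_inv_step dB hI t) (fun b => pv_step dA dB hI h t b)

theorem pv_bits_agree (cb : List (Int × Int × Int)) :
    pvInv (pvB_merged cb) ∧ ∀ b, (pvA_bits cb).get? b = pvLook (pvB_merged cb) b := by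
  have base1 : pvInv (PySem.Dict.empty : PySem.Dict Int (Int × Int)) := by
    intro key
    exact ⟨0, 0, by rw [PySem.Dict.getD_empty]; simp, by norm_num, by norm_num⟩
  have base2 : ∀ b, (PySem.Dict.empty : PySem.Dict Int Int).get? b
      = pvLook (PySem.Dict.empty : PySem.Dict Int (Int × Int)) b := by
    intro b
    unfold pvLook
    rw [PySem.Dict.getD_empty, PySem.Dict.get?_empty]
    simp [Int.testBit]
  have h := pv_loop cb PySem.Dict.empty PySem.Dict.empty base1 base2
  unfold pvA_bits pvB_merged
  simp only [pv_shift_cast]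
  exact h

-- ---- phase 2: field extraction ----

-- Nat-level byte concatenation (mirrors what the pvB_concat fold computes)
def pvCat (f : Int → Nat) (b0 : Int) : Nat → Nat
  | 0 => 0
  | n + 1 => pvCat f b0 n ||| ((f (b0 + n)) <<< (8 * n))

theorem pv_cat_testBit (f : Int → Nat) (b0 : Int) (hf : ∀ bo, f bo < 256) (n : Nat) (t : Nat) :
    (pvCat f b0 n).testBit t =
      if t < 8 * n then (f (b0 + (t / 8 : Nat))).testBit (t % 8) else false := by
  induction n with
  | zero => simp [pvCat]
  | succ n IH =>
    simp only [pvCat, Nat.testBit_or, IH, Nat.testBit_shiftLeft]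
    by_cases h : t < 8 * n
    · have h1 : ¬ (t ≥ 8 * n) := by omega
      simp only [h, if_pos, if_pos (by omega : t < 8 * (n + 1)), ge_iff_le, h1, decide_false,
        Bool.false_and, Bool.or_false]
    · by_cases h8 : t < 8 * n + 8
      · have h1 : t / 8 = n := by omega
        have h2 : t % 8 = t - 8 * n := by omega
        simp only [if_neg h, if_pos (by omega : t < 8 * (n + 1)), ge_iff_le,
          (by omega : 8 * n ≤ t), decide_true, Bool.true_and, Bool.false_or, h1, h2]
      · have h1 : (f (b0 + (n:Int))).testBit (t - 8 * n) = false :=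
          pv_testBit_ge _ _ (hf _) (by omega)
        rw [if_neg h, if_neg (by omega : ¬ t < 8 * (n + 1))]
        simp [h1]

theorem pv_concat_cast (P : PySem.Dict Int (Int × Int)) (hI : pvInv P) (b0 hi : Int) :
    pvB_concat P b0 hi =
      (((pvCat (fun bo => (P.getD bo (0,0)).1.toNat) b0 (hi - b0).toNat : Nat) : Int),
       ((pvCat (fun bo => (P.getD bo (0,0)).2.toNat) b0 (hi - b0).toNat : Nat) : Int)) := by
  unfold pvB_concat
  rw [PySem.List.pyRange_one, List.foldl_map]
  generalize (hi - b0).toNat = n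
  induction n with
  | zero => simp [pvCat]
  | succ n IH =>
    rw [List.range_succ, List.foldl_append, IH, List.foldl_cons, List.foldl_nil]
    obtain ⟨a, c, hp, _, _⟩ := hI (b0 + n)
    have hsh : (8 * (b0 + (n:Int) - b0)).toNat = 8 * n := by omega
    simp only [pvCat, hp, hsh, Int.toNat_natCast]
    rw [pv_shl_nn, pv_shl_nn, pv_bor_nn, pv_bor_nn]

-- Nat-level per-bit field value (mirrors what A's inner loop computes)
def pvBits (g : Int → Bool) (low : Int) : Nat → Nat
  | 0 => 0
  | n + 1 => pvBits g low n ||| ((if g (low + n) then 1 else 0) <<< n)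

theorem pv_testBit_one (j : Nat) : (1 : Nat).testBit j = decide (j = 0) := by
  cases j <;> simp [Nat.testBit_add_one]

theorem pv_bits_testBit (g : Int → Bool) (low : Int) (n t : Nat) :
    (pvBits g low n).testBit t = (decide (t < n) && g (low + t)) := by
  induction n with
  | zero => simp [pvBits]
  | succ n IH =>
    have hc : ∀ j, (if g (low + (n:Int)) then (1:Nat) else 0).testBit j
        = (decide (j = 0) && g (low + (n:Int))) := by
      intro j; split_ifs with hg <;> simp [pv_testBit_one, hg]
    simp only [pvBits, Nat.testBit_or, IH, Nat.testBit_shiftLeft, hc]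
    by_cases h : t < n
    · have h1 : ¬ (t ≥ n) := by omega
      simp [h, h1, (by omega : t < n + 1)]
    · by_cases h2 : t = n
      · subst h2
        simp [(by omega : t < t + 1)]
      · have h1 : ¬ (t < n + 1) := by omega
        have h3 : ¬ (t - n = 0) := by omega
        simp [h, h1, h3]

-- A's inner loop characterized by the per-bit reads
theorem pv_field_char (bits : PySem.Dict Int Int) (P : PySem.Dict Int (Int × Int))
    (hb : ∀ b, bits.get? b = pvLook P b) (low : Int) (L : List Int) (acc : Int) :
    pvA_field bits low L acc =
      if ∀ b ∈ L, (P.getD (b / 8) (0,0)).1.testBit (b % 8).toNat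
      then some (L.foldl (fun a b =>
        PySem.Int.bor a ((if (P.getD (b / 8) (0,0)).2.testBit (b % 8).toNat then (1:Int) else 0)
          <<< (b - low).toNat)) acc)
      else none := by
  induction L generalizing acc with
  | nil => simp [pvA_field]
  | cons b rest IH =>
    simp only [pvA_field]
    rw [hb b]
    unfold pvLook
    dsimp only
    by_cases hm : (P.getD (b / 8) (0,0)).1.testBit (b % 8).toNat
    · rw [if_pos hm]
      show pvA_field bits low rest (PySem.Int.bor acc
        ((if (P.getD (b / 8) (0,0)).2.testBit (b % 8).toNat then (1:Int) else 0)
          <<< (b - low).toNat)) = _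
      rw [IH]
      by_cases hr : ∀ x ∈ rest, (P.getD (x / 8) (0,0)).1.testBit (x % 8).toNat
      · have hall : ∀ x ∈ b :: rest, (P.getD (x / 8) (0,0)).1.testBit (x % 8).toNat := by
          intro x hx
          rcases List.mem_cons.mp hx with h | h
          · subst h; exact hm
          · exact hr x h
        rw [if_pos hr, if_pos hall, List.foldl_cons]
      · have hnall : ¬ ∀ x ∈ b :: rest, (P.getD (x / 8) (0,0)).1.testBit (x % 8).toNat := by
          intro hall
          exact hr (fun x hx => hall x (List.mem_cons_of_mem _ hx))
        rw [if_neg hr, if_neg hnall]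
    · rw [if_neg hm]
      rw [if_neg (by intro hall; exact hm (hall b (List.mem_cons_self ..)))]

-- a Nat slice equals the full mask iff every bit of the window is set
theorem pv_full_iff (X s w : Nat) :
    ((X >>> s) &&& (2 ^ w - 1) = 2 ^ w - 1) ↔ ∀ j, j < w → X.testBit (s + j) := by
  constructor
  · intro h j hj
    have := congrArg (fun z => z.testBit j) h
    simpa [Nat.testBit_and, Nat.testBit_shiftRight, Nat.testBit_two_pow_sub_one, hj] using this
  · intro h
    apply Nat.eq_of_testBit_eq
    intro i
    simp only [Nat.testBit_and, Nat.testBit_shiftRight, Nat.testBit_two_pow_sub_one]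
    by_cases hi : i < w
    · simp [hi, h i hi]
    · simp [hi]

-- A's or-accumulating value loop over a consecutive bit range, at the Nat level
theorem pv_val_cast (g : Int → Bool) (low hi : Int) :
    (PySem.List.pyRange low hi 1).foldl
      (fun a b => PySem.Int.bor a ((if g b then (1:Int) else 0) <<< (b - low).toNat)) 0
    = ((pvBits g low (hi - low).toNat : Nat) : Int) := by
  rw [PySem.List.pyRange_one, List.foldl_map]
  generalize (hi - low).toNat = n
  induction n with
  | zero => simp [pvBits]
  | succ n IH =>
    rw [List.range_succ, List.foldl_append, IH, List.foldl_cons, List.foldl_nil]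
    have h1 : (low + (n:Int) - low).toNat = n := by omega
    have h2 : (if g (low + (n:Int)) then (1:Int) else 0)
        = (((if g (low + (n:Int)) then 1 else 0) : Nat) : Int) := by
      split_ifs <;> simp
    rw [h1, h2, pv_shl_nn, pv_bor_nn]
    rfl

-- the per-field results of the two ports coincide
theorem pv_field_agree (cb : List (Int × Int × Int)) (low high : Int) :
    pvA_field (pvA_bits cb) low (PySem.List.pyRange low (high + 1) 1) 0 =
      (if PySem.Int.band ((pvB_concat (pvB_merged cb) (PySem.Int.floordiv low 8)
              (PySem.Int.floordiv high 8 + 1)).1 >>> (PySem.Int.mod low 8).toNat)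
            ((1 <<< (max 0 (high - low + 1)).toNat) - 1) = (1 <<< (max 0 (high - low + 1)).toNat) - 1
       then some (PySem.Int.band ((pvB_concat (pvB_merged cb) (PySem.Int.floordiv low 8)
              (PySem.Int.floordiv high 8 + 1)).2 >>> (PySem.Int.mod low 8).toNat)
            ((1 <<< (max 0 (high - low + 1)).toNat) - 1))
       else none) := by
  obtain ⟨hI, hb⟩ := pv_bits_agree cb
  have hfd : ∀ a : Int, PySem.Int.floordiv a 8 = a / 8 :=
    fun a => PySem.Int.floordiv_eq_ediv_of_pos (by norm_num)
  have hmd : PySem.Int.mod low 8 = low % 8 := PySem.Int.mod_eq_emod_of_pos (by norm_num)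
  rw [pv_field_char (pvA_bits cb) (pvB_merged cb) hb low _ 0]
  simp only [hfd, hmd]
  rw [pv_concat_cast (pvB_merged cb) hI]
  dsimp only
  -- notation
  set P := pvB_merged cb with hP
  set w : Nat := (max 0 (high - low + 1)).toNat with hwdef
  set s : Nat := (low % 8).toNat with hsdef
  set n : Nat := (high / 8 + 1 - low / 8).toNat with hndef
  set fm : Int → Nat := fun bo => (P.getD bo (0,0)).1.toNat with hfmdef
  set fv : Int → Nat := fun bo => (P.getD bo (0,0)).2.toNat with hfvdef
  have hww : w = (high + 1 - low).toNat := by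
    rcases le_total (high - low + 1) 0 with h | h
    · rw [hwdef, max_eq_left h]; omega
    · rw [hwdef, max_eq_right h]; omega
  have hfmlt : ∀ bo, fm bo < 256 := by
    intro bo; obtain ⟨a, c, hp, ha, _⟩ := hI bo
    rw [hfmdef]; dsimp only; rw [hp]; simpa using ha
  have hfvlt : ∀ bo, fv bo < 256 := by
    intro bo; obtain ⟨a, c, hp, _, hc⟩ := hI bo
    rw [hfvdef]; dsimp only; rw [hp]; simpa using hc
  have hs8 : (s : Int) = low % 8 := by
    rw [hsdef]; exact Int.toNat_of_nonneg (Int.emod_nonneg low (by norm_num))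
  -- the two byte-indexing facts, one per component
  have hMj : ∀ j, j < w → ((pvCat fm (low / 8) n).testBit (s + j)
      = (P.getD ((low + (j:Int)) / 8) (0,0)).1.testBit (((low + (j:Int)) % 8)).toNat) := by
    intro j hj
    have hjh : low + (j:Int) ≤ high := by omega
    have hlt : s + j < 8 * n := by omega
    have hq : (low / 8) + (((s + j) / 8 : Nat) : Int) = (low + (j:Int)) / 8 := by omega
    have hr : (s + j) % 8 = ((low + (j:Int)) % 8).toNat := by omega
    rw [pv_cat_testBit fm (low / 8) hfmlt n (s + j), if_pos hlt, hq, hr]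
    obtain ⟨a, c, hp, _, _⟩ := hI ((low + (j:Int)) / 8)
    rw [hfmdef]; dsimp only; rw [hp]
    simp [pv_testBit_nn]
  have hVj : ∀ j, j < w → ((pvCat fv (low / 8) n).testBit (s + j)
      = (P.getD ((low + (j:Int)) / 8) (0,0)).2.testBit (((low + (j:Int)) % 8)).toNat) := by
    intro j hj
    have hjh : low + (j:Int) ≤ high := by omega
    have hlt : s + j < 8 * n := by omega
    have hq : (low / 8) + (((s + j) / 8 : Nat) : Int) = (low + (j:Int)) / 8 := by omega
    have hr : (s + j) % 8 = ((low + (j:Int)) % 8).toNat := by omega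
    rw [pv_cat_testBit fv (low / 8) hfvlt n (s + j), if_pos hlt, hq, hr]
    obtain ⟨a, c, hp, _, _⟩ := hI ((low + (j:Int)) / 8)
    rw [hfvdef]; dsimp only; rw [hp]
    simp [pv_testBit_nn]
  -- the full mask as a Nat
  have hfull : (((1 <<< w : Nat) : Int)) - 1 = ((2 ^ w - 1 : Nat) : Int) := by
    rw [Nat.shiftLeft_eq, one_mul]
    have : 1 ≤ 2 ^ w := Nat.one_le_two_pow
    omega
  rw [hfull, pv_shr_nn, pv_shr_nn, pv_band_nn, pv_band_nn]
  -- the A-side value equals the B-side extracted value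
  have hval : ((PySem.List.pyRange low (high + 1) 1).foldl (fun a b =>
        PySem.Int.bor a ((if (P.getD (b / 8) (0,0)).2.testBit ((b % 8)).toNat then (1:Int) else 0)
          <<< (b - low).toNat)) 0)
      = ((((pvCat fv (low / 8) n) >>> s) &&& (2 ^ w - 1) : Nat) : Int) := by
    rw [pv_val_cast (fun b => (P.getD (b / 8) (0,0)).2.testBit ((b % 8)).toNat) low (high + 1)]
    congr 1
    rw [show (high + 1 - low).toNat = w from hww.symm]
    apply Nat.eq_of_testBit_eq
    intro t
    rw [pv_bits_testBit]
    simp only [Nat.testBit_and, Nat.testBit_shiftRight, Nat.testBit_two_pow_sub_one]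
    by_cases ht : t < w
    · rw [hVj t ht]
      simp [ht]
    · simp [ht]
  rw [hval]
  -- the two conditions are equivalent
  refine if_congr ?_ rfl rfl
  rw [Nat.cast_inj, pv_full_iff]
  constructor
  · intro hA j hj
    rw [hMj j hj]
    have hmem : (low + (j:Int)) ∈ PySem.List.pyRange low (high + 1) 1 := by
      rw [PySem.List.mem_pyRange_one]; omega
    exact hA _ hmem
  · intro hB b hbmem
    rw [PySem.List.mem_pyRange_one] at hbmem
    have hj : (b - low).toNat < w := by omega
    have := hB _ hj
    rw [hMj _ hj] at this
    have hbe : low + ((b - low).toNat : Int) = b := by omega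
    rw [hbe] at this
    exact this

-- ===== VERDICT (by name: the statement is the Claim_ definition above) =====
theorem decode_context_constraints_py_spec : Claim_equal_decode_context_constraints_py := by
  intro cb cf _hdom
  unfold Spec_decode_context_constraints_py
  unfold decode_context_constraints_py decode_context_constraints_py_alt
  simp only []
  congr 1
  apply List.foldl_ext
  intro d f _
  rw [pv_field_agree cb f.2.1 f.2.2]
  split_ifs with hc
  · rfl
  · rfl
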